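-- pv_equiv track=rewrite | github.com/JasonXJ/algorithms | cracking-coding-interview/5/bitutils.py | highest_1_bit_pos
-- ===== SOURCE A (Python) =====
-- def highest_1_bit_pos(x):
--     if x == 0:
--         return -1
--     x >>= 1
--     highest_bit = 0
--     while x != 0:
--         x >>= 1
--         highest_bit += 1
--     return highest_bit
-- ===== SOURCE B (Python) =====
-- def highest_1_bit_pos(x):
--     # Closed form: bit_length of x is one more than the position of the highest set bit,
--     # and bit_length of zero is zero, which reproduces the sentinel.
--     return x.bit_length() - 1
-- ===== Notes on version B (the rewrite author's own statement) =====
-- stated objective: idiomatic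
-- what changed: Replaces the shift-and-count while loop with the closed form x.bit_length() - 1 (no loop, no branching); both run too fast to time apart.
import Mathlib
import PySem

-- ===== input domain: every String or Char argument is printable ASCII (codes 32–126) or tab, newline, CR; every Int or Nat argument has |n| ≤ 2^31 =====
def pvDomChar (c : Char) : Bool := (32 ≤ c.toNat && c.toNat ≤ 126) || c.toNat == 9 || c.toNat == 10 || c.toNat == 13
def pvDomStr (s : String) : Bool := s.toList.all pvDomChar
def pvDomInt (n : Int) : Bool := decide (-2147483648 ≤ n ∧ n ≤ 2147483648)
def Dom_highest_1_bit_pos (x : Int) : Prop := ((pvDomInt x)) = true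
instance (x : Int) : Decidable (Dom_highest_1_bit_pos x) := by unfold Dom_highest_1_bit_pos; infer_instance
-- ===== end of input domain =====

-- B replaces A's shift-and-count loop with the closed form bit_length minus one (idiomatic, loop-free).

-- ===== PORT A =====
-- while x != 0: x >>= 1; highest_bit += 1   (the 'x ≤ 0' stop is a totality guard;
-- it agrees with 'x ≠ 0' on the nonnegative inputs Pre_ admits — Python loops forever for x < 0)
theorem pvShift1 (x : Int) : x >>> (1:Nat) = x.fdiv 2 := by
  rw [Int.shiftRight_eq_div_pow, Int.fdiv_eq_ediv]; norm_num

theorem pvShift1_toNat_lt (x : Int) (h : 0 < x) : (x >>> (1:Nat)).toNat < x.toNat := by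
  rw [pvShift1, Int.fdiv_eq_ediv]; omega

def pvALoop (x : Int) (highest_bit : Int) : Int :=
  if h : x ≤ 0 then highest_bit
  else pvALoop (x >>> (1:Nat)) (highest_bit + 1)
termination_by x.toNat
decreasing_by exact pvShift1_toNat_lt x (lt_of_not_ge h)

def highest_1_bit_pos (x : Int) : Int :=
  if x = 0 then -1
  else pvALoop (x >>> (1:Nat)) 0

-- ===== PORT B =====
def highest_1_bit_pos_alt (x : Int) : Int :=
  (PySem.Int.bitLength x : Int) - 1

-- ===== PRECONDITION & SPEC =====
-- Pre_ excludes negative x, on which Python A loops forever (x >> 1 stays -1); it excludes no input A returns on.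
def Pre_highest_1_bit_pos (x : Int) : Prop := 0 ≤ x
instance (x : Int) : Decidable (Pre_highest_1_bit_pos x) := by unfold Pre_highest_1_bit_pos; infer_instance
def pvWitness_highest_1_bit_pos : Int := 12

def Spec_highest_1_bit_pos (x : Int) (out : Int) : Prop := out = highest_1_bit_pos_alt x
instance (x : Int) (out : Int) : Decidable (Spec_highest_1_bit_pos x out) := by unfold Spec_highest_1_bit_pos; infer_instance

-- ===== CLAIM (what is proved, stated in full; the proofs are below) =====
def Claim_equal_highest_1_bit_pos : Prop := ∀ (x : Int), Dom_highest_1_bit_pos x → Pre_highest_1_bit_pos x → Spec_highest_1_bit_pos x (highest_1_bit_pos x)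

-- ===== LEMMAS AND PROOFS =====

theorem pvALoop_eq (n : Nat) : ∀ (x : Int), 0 ≤ x → x.toNat = n → ∀ (hb : Int),
    pvALoop x hb = hb + (PySem.Int.bitLength x : Int) := by
  induction n using Nat.strong_induction_on with
  | _ n ih =>
    intro x hx hn hb
    by_cases h : x ≤ 0
    · have hx0 : x = 0 := le_antisymm h hx
      subst hx0
      rw [pvALoop]
      simp [PySem.Int.bitLength_zero]
    · have hpos : 0 < x := lt_of_not_ge h
      have hnn : 0 ≤ x >>> (1:Nat) := by rw [pvShift1, Int.fdiv_eq_ediv]; omega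
      have hlt : (x >>> (1:Nat)).toNat < n := hn ▸ pvShift1_toNat_lt x hpos
      have hfd : x >>> (1:Nat) = PySem.Int.floordiv x 2 := by
        rw [pvShift1]; rfl
      rw [pvALoop, dif_neg h,
          ih _ hlt _ hnn rfl, hfd, PySem.Int.bitLength_of_pos hpos]
      push_cast
      ring

-- ===== VERDICT (by name: the statement is the Claim_ definition above) =====
theorem highest_1_bit_pos_spec : Claim_equal_highest_1_bit_pos := by
  intro x _ hpre
  unfold Spec_highest_1_bit_pos highest_1_bit_pos highest_1_bit_pos_alt
  by_cases hx : x = 0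
  · simp [hx, PySem.Int.bitLength_zero]
  · have hpos : 0 < x := lt_of_le_of_ne hpre (Ne.symm hx)
    have hnn : 0 ≤ x >>> (1:Nat) := by rw [pvShift1, Int.fdiv_eq_ediv]; omega
    rw [if_neg hx, pvALoop_eq (x >>> (1:Nat)).toNat _ hnn rfl 0,
        show x >>> (1:Nat) = PySem.Int.floordiv x 2 from by rw [pvShift1]; rfl,
        PySem.Int.bitLength_of_pos hpos]
    push_cast
    ring
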